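-- pv_equiv track=rewrite | github.com/AbhiramAbbireddy/AI-FAIR_PROJECT | src/learning_path_generator.py | _group_by_quarter
-- ===== SOURCE A (Python) =====
-- from typing import Dict, List
--
-- def _group_by_quarter(timeline: List[Dict]) -> Dict[str, List[Dict]]:
--     """Group skills by quarter for visualization.
--
--     Args:
--         timeline: List of timeline items
--
--     Returns:
--         Dict with Q1, Q2, Q3, Q4 keys
--     """
--     quarters = {"Q1": [], "Q2": [], "Q3": [], "Q4": []}
--
--     for item in timeline:
--         quarter_num = (item["end_month"] - 1) // 3  # 0-indexed quarter
--         if quarter_num < 0: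
--             quarter_num = 0
--         elif quarter_num > 3:
--             quarter_num = 3
--
--         quarter_key = f"Q{quarter_num + 1}"
--         quarters[quarter_key].append(item)
--
--     return quarters
-- ===== SOURCE B (Python) =====
-- def _group_by_quarter(timeline):
--     """Group skills by quarter: one filtering pass of the whole timeline per quarter bucket."""
--     def _quarter(item):
--         q = (item["end_month"] - 1) // 3
--         return 0 if q < 0 else (3 if q > 3 else q)
--     return {"Q%d" % (q + 1): [item for item in timeline if _quarter(item) == q]
--             for q in range(4)}
-- ===== Notes on version B (the rewrite author's own statement) =====
-- stated objective: alternative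
-- what changed: Replaces A's single dispatch loop that mutates four pre-created dict buckets with a dict comprehension that makes four independent filtering passes over the timeline, one per quarter key.
import Mathlib
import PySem

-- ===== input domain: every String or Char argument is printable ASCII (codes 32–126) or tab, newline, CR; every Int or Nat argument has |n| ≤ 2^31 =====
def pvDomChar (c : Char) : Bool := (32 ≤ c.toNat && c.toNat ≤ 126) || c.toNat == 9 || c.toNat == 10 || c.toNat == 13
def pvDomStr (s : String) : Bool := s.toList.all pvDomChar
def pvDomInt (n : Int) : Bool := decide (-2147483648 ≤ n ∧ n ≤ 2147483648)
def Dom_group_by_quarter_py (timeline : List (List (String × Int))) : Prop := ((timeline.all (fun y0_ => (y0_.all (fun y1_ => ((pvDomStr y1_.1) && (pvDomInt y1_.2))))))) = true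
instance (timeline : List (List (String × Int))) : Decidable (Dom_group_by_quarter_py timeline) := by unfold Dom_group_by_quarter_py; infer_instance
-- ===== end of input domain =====

-- B replaces A's single dispatch loop over four pre-created mutable buckets with four
-- independent filtering passes over the timeline, one per quarter key (alternative structure, same cost class).

-- ===== PORT A =====
-- A's loop body; the Option threads the KeyError of item["end_month"] (none = raise, excluded by Pre_)
def pvStepA (acc : Option (PySem.Dict String (List (List (String × Int))))) (item : List (String × Int)) :
    Option (PySem.Dict String (List (List (String × Int)))) :=
  acc.bind (fun quarters =>
    ((PySem.Dict.mk item).get? "end_month").map (fun m =>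
      let quarter_num := PySem.Int.floordiv (m - 1) 3
      let quarter_num := if quarter_num < 0 then 0 else if quarter_num > 3 then 3 else quarter_num
      let quarter_key := "Q" ++ PySem.Int.toStr (quarter_num + 1)
      quarters.modify quarter_key [] (fun l => l ++ [item])))

def group_by_quarter_py (timeline : List (List (String × Int))) : List (String × List (List (String × Int))) :=
  let quarters : PySem.Dict String (List (List (String × Int))) :=
    PySem.Dict.ofList [("Q1", []), ("Q2", []), ("Q3", []), ("Q4", [])]
  -- the fold is A's for-loop; .getD quarters is a dummy on the KeyError path, which Pre_ excludes
  ((timeline.foldl pvStepA (some quarters)).getD quarters).items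

-- ===== PORT B =====
-- Source B's local helper _quarter (none = KeyError on a missing "end_month" key, excluded by Pre_)
def pvQuarterB (item : List (String × Int)) : Option Int :=
  ((PySem.Dict.mk item).get? "end_month").map (fun m =>
    let q := PySem.Int.floordiv (m - 1) 3
    if q < 0 then 0 else if q > 3 then 3 else q)

def group_by_quarter_py_alt (timeline : List (List (String × Int))) : List (String × List (List (String × Int))) :=
  (PySem.List.pyRange 0 4 1).map (fun q =>
    ("Q" ++ PySem.Int.toStr (q + 1),
     timeline.filter (fun item => pvQuarterB item == some q)))

-- ===== PRECONDITION & SPEC =====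
-- Pre_ excludes exactly the inputs where item["end_month"] raises KeyError (both A and B raise there).
def Pre_group_by_quarter_py (timeline : List (List (String × Int))) : Prop :=
  (timeline.all (fun item => (PySem.Dict.mk item).contains "end_month")) = true
instance (timeline : List (List (String × Int))) : Decidable (Pre_group_by_quarter_py timeline) := by
  unfold Pre_group_by_quarter_py; infer_instance

def pvWitness_group_by_quarter_py : (List (List (String × Int))) :=
  [[("end_month", 2)], [("end_month", 11), ("level", 1)]]

def Spec_group_by_quarter_py (timeline : List (List (String × Int))) (out : List (String × List (List (String × Int)))) : Prop := out = group_by_quarter_py_alt timeline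
instance (timeline : List (List (String × Int))) (out : List (String × List (List (String × Int)))) : Decidable (Spec_group_by_quarter_py timeline out) := by unfold Spec_group_by_quarter_py; infer_instance

-- ===== CLAIM (what is proved, stated in full; the proofs are below) =====
def Claim_equal_group_by_quarter_py : Prop := ∀ (timeline : List (List (String × Int))), Dom_group_by_quarter_py timeline → Pre_group_by_quarter_py timeline → Spec_group_by_quarter_py timeline (group_by_quarter_py timeline)

-- ===== LEMMAS AND PROOFS =====

-- loop invariant of A's fold: with every item carrying "end_month", the four buckets
-- accumulate exactly the per-quarter filters of the processed prefix
theorem pvFoldA_inv (ts : List (List (String × Int)))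
    (h : ∀ it ∈ ts, ((PySem.Dict.mk it).get? "end_month").isSome)
    (a b c d : List (List (String × Int))) :
    ts.foldl pvStepA (some (PySem.Dict.mk [("Q1", a), ("Q2", b), ("Q3", c), ("Q4", d)])) =
    some (PySem.Dict.mk
      [("Q1", a ++ ts.filter (fun it => pvQuarterB it == some 0)),
       ("Q2", b ++ ts.filter (fun it => pvQuarterB it == some 1)),
       ("Q3", c ++ ts.filter (fun it => pvQuarterB it == some 2)),
       ("Q4", d ++ ts.filter (fun it => pvQuarterB it == some 3))]) := by
  induction ts generalizing a b c d with
  | nil => simp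
  | cons it ts ih =>
    obtain ⟨m, hm⟩ := Option.isSome_iff_exists.mp (h it (List.mem_cons_self ..))
    have hts : ∀ x ∈ ts, ((PySem.Dict.mk x).get? "end_month").isSome :=
      fun x hx => h x (List.mem_cons_of_mem _ hx)
    have hq : pvQuarterB it = some (let q := PySem.Int.floordiv (m - 1) 3;
        if q < 0 then 0 else if q > 3 then 3 else q) := by
      simp [pvQuarterB, hm]
    have hc : (let q := PySem.Int.floordiv (m - 1) 3;
        if q < 0 then 0 else if q > 3 then 3 else q) = 0 ∨
        (let q := PySem.Int.floordiv (m - 1) 3;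
        if q < 0 then 0 else if q > 3 then 3 else q) = 1 ∨
        (let q := PySem.Int.floordiv (m - 1) 3;
        if q < 0 then 0 else if q > 3 then 3 else q) = 2 ∨
        (let q := PySem.Int.floordiv (m - 1) 3;
        if q < 0 then 0 else if q > 3 then 3 else q) = 3 := by
      simp only []; split_ifs <;> omega
    rcases hc with hc | hc | hc | hc
    · simp only [List.foldl_cons, pvStepA, hm, Option.bind_some, Option.map_some, hc]
      rw [show ("Q" ++ PySem.Int.toStr (0 + 1) : String) = "Q1" from by decide]
      rw [show (PySem.Dict.mk [("Q1", a), ("Q2", b), ("Q3", c), ("Q4", d)]).modify "Q1" [] (fun l => l ++ [it]) = PySem.Dict.mk [("Q1", a ++ [it]), ("Q2", b), ("Q3", c), ("Q4", d)] from by simp [PySem.Dict.modify, PySem.Dict.insert, PySem.Dict.contains, PySem.Dict.getD, PySem.Dict.get?]]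
      rw [ih hts]
      rw [hc] at hq
      simp [hq]
    · simp only [List.foldl_cons, pvStepA, hm, Option.bind_some, Option.map_some, hc]
      rw [show ("Q" ++ PySem.Int.toStr (1 + 1) : String) = "Q2" from by decide]
      rw [show (PySem.Dict.mk [("Q1", a), ("Q2", b), ("Q3", c), ("Q4", d)]).modify "Q2" [] (fun l => l ++ [it]) = PySem.Dict.mk [("Q1", a), ("Q2", b ++ [it]), ("Q3", c), ("Q4", d)] from by simp [PySem.Dict.modify, PySem.Dict.insert, PySem.Dict.contains, PySem.Dict.getD, PySem.Dict.get?]]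
      rw [ih hts]
      rw [hc] at hq
      simp [hq]
    · simp only [List.foldl_cons, pvStepA, hm, Option.bind_some, Option.map_some, hc]
      rw [show ("Q" ++ PySem.Int.toStr (2 + 1) : String) = "Q3" from by decide]
      rw [show (PySem.Dict.mk [("Q1", a), ("Q2", b), ("Q3", c), ("Q4", d)]).modify "Q3" [] (fun l => l ++ [it]) = PySem.Dict.mk [("Q1", a), ("Q2", b), ("Q3", c ++ [it]), ("Q4", d)] from by simp [PySem.Dict.modify, PySem.Dict.insert, PySem.Dict.contains, PySem.Dict.getD, PySem.Dict.get?]]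
      rw [ih hts]
      rw [hc] at hq
      simp [hq]
    · simp only [List.foldl_cons, pvStepA, hm, Option.bind_some, Option.map_some, hc]
      rw [show ("Q" ++ PySem.Int.toStr (3 + 1) : String) = "Q4" from by decide]
      rw [show (PySem.Dict.mk [("Q1", a), ("Q2", b), ("Q3", c), ("Q4", d)]).modify "Q4" [] (fun l => l ++ [it]) = PySem.Dict.mk [("Q1", a), ("Q2", b), ("Q3", c), ("Q4", d ++ [it])] from by simp [PySem.Dict.modify, PySem.Dict.insert, PySem.Dict.contains, PySem.Dict.getD, PySem.Dict.get?]]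
      rw [ih hts]
      rw [hc] at hq
      simp [hq]

-- ===== VERDICT (by name: the statement is the Claim_ definition above) =====
theorem group_by_quarter_py_spec : Claim_equal_group_by_quarter_py := by
  intro timeline _ hpre
  unfold Spec_group_by_quarter_py
  unfold Pre_group_by_quarter_py at hpre
  have hpre' : ∀ it ∈ timeline, ((PySem.Dict.mk it).get? "end_month").isSome := by
    intro it hit
    have h2 := List.all_eq_true.mp hpre it hit
    rwa [PySem.Dict.contains_eq_isSome_get?] at h2
  unfold group_by_quarter_py group_by_quarter_py_alt
  rw [show (PySem.Dict.ofList [("Q1", ([] : List (List (String × Int)))), ("Q2", []), ("Q3", []), ("Q4", [])]) = PySem.Dict.mk [("Q1", []), ("Q2", []), ("Q3", []), ("Q4", [])] from by decide]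
  simp only []
  rw [pvFoldA_inv timeline hpre' [] [] [] []]
  rw [show PySem.List.pyRange 0 4 1 = [0, 1, 2, 3] from by decide]
  simp [
    show ("Q" ++ PySem.Int.toStr (1 : Int) : String) = "Q1" from by decide,
    show ("Q" ++ PySem.Int.toStr (2 : Int) : String) = "Q2" from by decide,
    show ("Q" ++ PySem.Int.toStr (3 : Int) : String) = "Q3" from by decide,
    show ("Q" ++ PySem.Int.toStr (4 : Int) : String) = "Q4" from by decide]
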